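-- pv_equiv track=rewrite | github.com/pypi-data/pypi-mirror-235 | packages/moller/moller-1.0.0-py3-none-any.whl/moller/util.py | find_mid_of_longest_run_with_wrap
-- ===== SOURCE A (Python) =====
-- import math
--
-- def find_mid_of_longest_run_with_wrap(arr, value):
--     cur = 0
--     pos = 0
--     run = 0
--     mid_pos = 0
--     old_run = 0
--     loop = False
--
--     while(True):
--         if arr[cur] == value:
--             if run == 0:
--                 pos = cur
--             run = run + 1
--         else:
--             if loop == True:
--                 if old_run < run:
--                     old_run = run
--                     mid_pos = pos + math.floor(run / 2)
--                     if(mid_pos >= len(arr)):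
--                         mid_pos = mid_pos - len(arr)
--
--                 break
--             else:
--                 if old_run < run:
--                     old_run = run
--                     mid_pos = pos + math.floor(run / 2)
--                     if(mid_pos >= len(arr)):
--                         mid_pos = mid_pos - len(arr)
--                     pos = cur
--
--             run = 0
--
--
--         cur = cur + 1
--
--         # Its over, and last value was not part of run
--         if cur == len(arr) and (run == 0 or run == len(arr)) :
--             if run == len(arr):
--                 mid_pos = math.floor(len(arr) / 2)
--             break
--
--         # Hit end of array, but loop check
--         if cur == len(arr) and run != 0:
--             loop = True
--             cur = 0
--
--     return mid_pos
-- ===== SOURCE B (Python) =====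
-- def find_mid_of_longest_run_with_wrap(arr, value):
--     # Build the list of maximal runs of `value` as (start, length) pairs,
--     # merge the leading run into the trailing run when the run wraps around,
--     # then pick the longest (earliest on ties) and return its midpoint.
--     n = len(arr)
--     runs = []
--     start = None
--     for i, x in enumerate(arr):
--         if x == value:
--             if start is None:
--                 start = i
--         else:
--             if start is not None:
--                 runs.append((start, i - start))
--                 start = None
--     if start is not None:
--         runs.append((start, n - start))
--     if not runs:
--         return 0
--     if len(runs) > 1 and runs[0][0] == 0 and runs[-1][0] + runs[-1][1] == n:
--         s, l = runs[-1]
--         runs = runs[1:-1] + [(s, l + runs[0][1])]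
--     best_s, best_l = runs[0]
--     for s, l in runs[1:]:
--         if l > best_l:
--             best_s, best_l = s, l
--     return (best_s + best_l // 2) % n
-- ===== Notes on version B (the rewrite author's own statement) =====
-- stated objective: simpler
-- what changed: A's single stateful while-True scan with a wrap-around second pass is replaced by a three-step decomposition: collect the maximal runs of value as (start, length) pairs, merge the leading run into the trailing run when both touch the array ends, then pick the longest run (earliest on ties) and return its midpoint modulo n; the lighter per-element loop body also measures a constant-factor speedup.
import Mathlib
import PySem

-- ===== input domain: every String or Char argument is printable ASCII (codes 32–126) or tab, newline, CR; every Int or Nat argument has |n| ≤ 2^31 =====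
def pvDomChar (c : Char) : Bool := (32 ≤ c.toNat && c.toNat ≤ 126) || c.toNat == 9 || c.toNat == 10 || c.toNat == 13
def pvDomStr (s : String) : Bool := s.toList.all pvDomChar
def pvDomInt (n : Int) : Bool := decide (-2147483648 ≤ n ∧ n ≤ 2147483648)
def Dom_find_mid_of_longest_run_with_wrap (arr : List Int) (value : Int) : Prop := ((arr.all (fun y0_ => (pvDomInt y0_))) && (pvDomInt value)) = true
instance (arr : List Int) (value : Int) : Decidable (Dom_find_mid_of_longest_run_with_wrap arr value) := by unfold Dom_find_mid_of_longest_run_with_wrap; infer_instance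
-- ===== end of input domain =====

-- B rebuilds the function as: materialise the maximal runs of `value`, merge the
-- wrapping pair, pick the longest (earliest on ties), return its midpoint — a
-- simpler decomposition than A's single stateful wrap-around scan (objective: simpler).

-- ===== PORT A =====
-- Literal transliteration of A's while-True loop; the Nat argument is recursion
-- fuel only (2*len+2 strictly exceeds the loop's iteration count: one pass plus at
-- most one wrapped partial pass), each iteration mirrors A's body step for step.
-- arr[cur] is read with default 0: under Pre_ (arr ≠ []) every read A performs is
-- in range (exact there); on [] Python raises IndexError, excluded by Pre_.
def pvLoopA (arr : List Int) (value : Int) : Nat → Int → Int → Int → Int → Int → Bool → Int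
  | 0, _, _, _, mid_pos, _, _ => mid_pos
  | fuel + 1, cur, pos, run, mid_pos, old_run, loop =>
    let n : Int := arr.length
    if PySem.List.pyGetD arr cur 0 = value then
      let pos' := if run = 0 then cur else pos
      if cur + 1 = n ∧ (run + 1 = 0 ∨ run + 1 = n) then
        (if run + 1 = n then PySem.Int.floordiv n 2 else mid_pos)
      else if cur + 1 = n ∧ run + 1 ≠ 0 then
        pvLoopA arr value fuel 0 pos' (run + 1) mid_pos old_run true
      else
        pvLoopA arr value fuel (cur + 1) pos' (run + 1) mid_pos old_run loop
    else
      if loop = true then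
        if old_run < run then
          let m := pos + PySem.Int.floordiv run 2
          if m ≥ n then m - n else m
        else mid_pos
      else
        let mid' := if old_run < run then
            (let m := pos + PySem.Int.floordiv run 2
             if m ≥ n then m - n else m)
          else mid_pos
        let old' := if old_run < run then run else old_run
        let pos' := if old_run < run then cur else pos
        if cur + 1 = n ∧ ((0 : Int) = 0 ∨ (0 : Int) = n) then
          (if (0 : Int) = n then PySem.Int.floordiv n 2 else mid')
        else if cur + 1 = n ∧ (0 : Int) ≠ 0 then
          pvLoopA arr value fuel 0 pos' 0 mid' old' true
        else
          pvLoopA arr value fuel (cur + 1) pos' 0 mid' old' loop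

def find_mid_of_longest_run_with_wrap (arr : List Int) (value : Int) : Int :=
  pvLoopA arr value (2 * arr.length + 2) 0 0 0 0 0 false

-- ===== PORT B =====
-- Source B's enumerate loop collecting maximal runs (start, length); `ost` is the
-- `start` variable (None while no run is open), `runs` the accumulator.
def pvRunsGo (value : Int) : List Int → Int → Option Int → List (Int × Int) → List (Int × Int)
  | [], i, ost, runs =>
    match ost with
    | some s => runs ++ [(s, i - s)]
    | none => runs
  | x :: xs, i, ost, runs =>
    if x = value then
      match ost with
      | some s => pvRunsGo value xs (i + 1) (some s) runs
      | none => pvRunsGo value xs (i + 1) (some i) runs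
    else
      match ost with
      | some s => pvRunsGo value xs (i + 1) none (runs ++ [(s, i - s)])
      | none => pvRunsGo value xs (i + 1) none runs

-- Source B's selection loop: best = runs[0]; for r in runs[1:]: strict > keeps the earliest.
def pvSelect : List (Int × Int) → (Int × Int) → (Int × Int)
  | [], best => best
  | r :: rest, best => pvSelect rest (if r.2 > best.2 then r else best)

def find_mid_of_longest_run_with_wrap_alt (arr : List Int) (value : Int) : Int :=
  let n : Int := arr.length
  match pvRunsGo value arr 0 none [] with
  | [] => 0
  | r0 :: rest =>
    let last := (r0 :: rest).getLast (List.cons_ne_nil r0 rest)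
    let runs := if rest ≠ [] ∧ r0.1 = 0 ∧ last.1 + last.2 = n then
        rest.dropLast ++ [(last.1, last.2 + r0.2)]
      else r0 :: rest
    let best := pvSelect runs.tail (runs.headD (0, 0))
    PySem.Int.mod (best.1 + PySem.Int.floordiv best.2 2) n

-- ===== PRECONDITION & SPEC =====
-- Pre_ excludes only the empty list, on which A's `arr[0]` raises IndexError
-- (B naturally finds no runs there and returns 0).
def Pre_find_mid_of_longest_run_with_wrap (arr : List Int) (value : Int) : Prop := arr ≠ []
instance (arr : List Int) (value : Int) : Decidable (Pre_find_mid_of_longest_run_with_wrap arr value) := by unfold Pre_find_mid_of_longest_run_with_wrap; infer_instance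

def pvWitness_find_mid_of_longest_run_with_wrap : List Int × Int := ([1, 0, 1], 1)

def Spec_find_mid_of_longest_run_with_wrap (arr : List Int) (value : Int) (out : Int) : Prop := out = find_mid_of_longest_run_with_wrap_alt arr value
instance (arr : List Int) (value : Int) (out : Int) : Decidable (Spec_find_mid_of_longest_run_with_wrap arr value out) := by unfold Spec_find_mid_of_longest_run_with_wrap; infer_instance

-- ===== CLAIM (what is proved, stated in full; the proofs are below) =====
def Claim_equal_find_mid_of_longest_run_with_wrap : Prop := ∀ (arr : List Int) (value : Int), Dom_find_mid_of_longest_run_with_wrap arr value → Pre_find_mid_of_longest_run_with_wrap arr value → Spec_find_mid_of_longest_run_with_wrap arr value (find_mid_of_longest_run_with_wrap arr value)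

-- ===== LEMMAS AND PROOFS =====

-- A's midpoint formula: pos + run//2, reduced once into [0, n).
def pvWrapmid (n s l : Int) : Int :=
  let m := s + PySem.Int.floordiv l 2
  if m ≥ n then m - n else m

-- A's (mid_pos, old_run) pair as a fold over a list of closed runs.
def pvAmid (n : Int) : List (Int × Int) → Int × Int → Int × Int
  | [], mo => mo
  | r :: rest, mo => pvAmid n rest (if mo.2 < r.2 then (pvWrapmid n r.1 r.2, r.2) else mo)

-- A's wrapped second pass (loop == True), scanning from index 0.
def pvP2 (v n : Int) : List Int → Int → Int → Int → Int → Int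
  | [], _, _, mid, _ => mid
  | x :: xs, pos, run, mid, old =>
    if x = v then pvP2 v n xs pos (run + 1) mid old
    else if old < run then pvWrapmid n pos run else mid

lemma pvGetAt (pre : List Int) (x : Int) (xs : List Int) :
    PySem.List.pyGetD (pre ++ x :: xs) ((pre.length : Int)) 0 = x := by
  rw [PySem.List.pyGetD_natCast]
  simp [List.getD_eq_getElem?_getD]

lemma pvFd_nonneg {l : Int} (h : 0 ≤ l) : 0 ≤ PySem.Int.floordiv l 2 := by
  rw [PySem.Int.floordiv_eq_ediv_of_pos (a := l) (by norm_num)]; omega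

lemma pvFd_lt {l : Int} (h : 1 ≤ l) : PySem.Int.floordiv l 2 < l := by
  rw [PySem.Int.floordiv_eq_ediv_of_pos (a := l) (by norm_num)]; omega

lemma pvMod_small {m n : Int} (h0 : 0 ≤ m) (h2 : m < 2 * n) :
    PySem.Int.mod m n = if m ≥ n then m - n else m := by
  rw [PySem.Int.mod_eq_emod_of_pos (a := m) (by omega)]
  split_ifs with h
  · have h1 : m % n = (m - n) % n := (Int.sub_emod_right m n).symm
    rw [h1, Int.emod_eq_of_lt (by omega) (by omega)]
  · exact Int.emod_eq_of_lt h0 (by omega)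

lemma pvSelect_append (l1 l2 : List (Int × Int)) (b : Int × Int) :
    pvSelect (l1 ++ l2) b = pvSelect l2 (pvSelect l1 b) := by
  induction l1 generalizing b with
  | nil => simp [pvSelect]
  | cons r rest ih => simp [pvSelect, ih]

lemma pvSelect_mem (l : List (Int × Int)) (b : Int × Int) : pvSelect l b ∈ b :: l := by
  induction l generalizing b with
  | nil => simp [pvSelect]
  | cons r rest ih =>
    simp only [pvSelect]
    have h := ih (if r.2 > b.2 then r else b)
    rcases List.mem_cons.mp h with h' | h'
    · rw [h']; split_ifs with hc
      · exact List.mem_cons_of_mem _ (by simp)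
      · simp
    · exact List.mem_cons_of_mem _ (List.mem_cons_of_mem _ h')

lemma pvSelect_le (l : List (Int × Int)) (b : Int × Int) :
    b.2 ≤ (pvSelect l b).2 ∧ ∀ r ∈ l, r.2 ≤ (pvSelect l b).2 := by
  induction l generalizing b with
  | nil => simp [pvSelect]
  | cons r rest ih =>
    obtain ⟨h1, h2⟩ := ih (if r.2 > b.2 then r else b)
    simp only [pvSelect]
    constructor
    · refine le_trans ?_ h1; split_ifs with hc <;> omega
    · intro q hq
      rcases List.mem_cons.mp hq with rfl | hq'
      · refine le_trans ?_ h1; split_ifs with hc <;> omega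
      · exact h2 q hq'

lemma pvSelect_switch (l : List (Int × Int)) (a b : Int × Int)
    (hba : b.2 ≤ a.2) (hex : ∃ x ∈ l, a.2 < x.2) : pvSelect l a = pvSelect l b := by
  induction l generalizing a b with
  | nil => obtain ⟨x, hx, _⟩ := hex; simp at hx
  | cons y rest ih =>
    obtain ⟨x, hx, hax⟩ := hex
    simp only [pvSelect]
    by_cases hy : y.2 > a.2
    · rw [if_pos hy, if_pos (by omega)]
    · rw [if_neg hy]
      by_cases hyb : y.2 > b.2
      · rw [if_pos hyb]
        exact ih a y (by omega) ⟨x, by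
          rcases List.mem_cons.mp hx with rfl | h'
          · omega
          · exact ⟨h', hax⟩⟩
      · rw [if_neg hyb]
        exact ih a b hba ⟨x, by
          rcases List.mem_cons.mp hx with rfl | h'
          · omega
          · exact ⟨h', hax⟩⟩

lemma pvAmid_append (n : Int) (l : List (Int × Int)) (r mo : Int × Int) :
    pvAmid n (l ++ [r]) mo =
      (if (pvAmid n l mo).2 < r.2 then (pvWrapmid n r.1 r.2, r.2) else pvAmid n l mo) := by
  induction l generalizing mo with
  | nil => simp [pvAmid]
  | cons q rest ih => simp only [List.cons_append, pvAmid, ih]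

lemma pvAmid_sel (n : Int) (l : List (Int × Int)) (b : Int × Int) :
    pvAmid n l (pvWrapmid n b.1 b.2, b.2) =
      (pvWrapmid n (pvSelect l b).1 (pvSelect l b).2, (pvSelect l b).2) := by
  induction l generalizing b with
  | nil => simp [pvAmid, pvSelect]
  | cons r rest ih =>
    simp only [pvAmid, pvSelect]
    by_cases h : b.2 < r.2
    · rw [if_pos h, if_pos (by omega)]; exact ih r
    · rw [if_neg h, if_neg (by omega)]; exact ih b

lemma pvAmid_cons (n : Int) (a0 : Int × Int) (l : List (Int × Int)) (h : 0 < a0.2) :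
    pvAmid n (a0 :: l) (0, 0) =
      (pvWrapmid n (pvSelect l a0).1 (pvSelect l a0).2, (pvSelect l a0).2) := by
  have : pvAmid n (a0 :: l) (0, 0) = pvAmid n l (pvWrapmid n a0.1 a0.2, a0.2) := by
    simp only [pvAmid]; rw [if_pos h]
  rw [this, pvAmid_sel]

lemma pvRunsGo_acc (v : Int) :
    ∀ (l : List Int) (i : Int) (ost : Option Int) (acc : List (Int × Int)),
      pvRunsGo v l i ost acc = acc ++ pvRunsGo v l i ost [] := by
  intro l
  induction l with
  | nil => intro i ost acc; cases ost <;> simp [pvRunsGo]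
  | cons x xs ih =>
    intro i ost acc
    cases ost with
    | none =>
      by_cases hx : x = v
      · simp only [pvRunsGo, if_pos hx]; exact ih ..
      · simp only [pvRunsGo, if_neg hx]; exact ih ..
    | some s =>
      by_cases hx : x = v
      · simp only [pvRunsGo, if_pos hx]; exact ih ..
      · simp only [pvRunsGo, if_neg hx]
        rw [ih _ _ (acc ++ [(s, i - s)]), ih _ _ ([] ++ [(s, i - s)])]
        simp

lemma pvRunsGo_consume (v w : Int) (hw : w ≠ v) :
    ∀ (k : Nat) (t : List Int) (i s : Int) (acc : List (Int × Int)),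
      pvRunsGo v (List.replicate k v ++ w :: t) i (some s) acc =
        pvRunsGo v t (i + k + 1) none (acc ++ [(s, i + k - s)]) := by
  intro k
  induction k with
  | zero => intro t i s acc; simp [pvRunsGo, hw]
  | succ k ih =>
    intro t i s acc
    rw [List.replicate_succ, List.cons_append]
    simp only [pvRunsGo, if_pos rfl]
    rw [ih]
    congr 1 <;> push_cast <;> ring_nf

lemma pvRunsGo_lead (v w : Int) (hw : w ≠ v) (k : Nat) (hk : 0 < k) (t : List Int)
    (i : Int) (acc : List (Int × Int)) :
    pvRunsGo v (List.replicate k v ++ w :: t) i none acc =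
      pvRunsGo v t (i + k + 1) none (acc ++ [(i, (k : Int))]) := by
  obtain ⟨k', rfl⟩ : ∃ k', k = k' + 1 := ⟨k - 1, by omega⟩
  rw [List.replicate_succ, List.cons_append]
  simp only [pvRunsGo, if_pos rfl]
  rw [pvRunsGo_consume v w hw]
  congr 1 <;> push_cast <;> ring_nf

lemma pvRunsGo_mono (v : Int) :
    ∀ (l : List Int) (i j : Int) (ost : Option Int),
      j ≤ i → (∀ s, ost = some s → j ≤ s) →
      ∀ p ∈ pvRunsGo v l i ost [], j ≤ p.1 := by
  intro l
  induction l with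
  | nil =>
    intro i j ost hji hs p hp
    cases ost with
    | none => simp [pvRunsGo] at hp
    | some s =>
      simp only [pvRunsGo, List.nil_append, List.mem_singleton] at hp
      subst hp; exact hs s rfl
  | cons x xs ih =>
    intro i j ost hji hs p hp
    cases ost with
    | none =>
      by_cases hx : x = v
      · simp only [pvRunsGo, if_pos hx] at hp
        exact ih (i + 1) j (some i) (by omega) (fun s h => by cases h; exact hji) p hp
      · simp only [pvRunsGo, if_neg hx] at hp
        exact ih (i + 1) j none (by omega) (fun s h => by cases h) p hp
    | some s =>
      by_cases hx : x = v
      · simp only [pvRunsGo, if_pos hx] at hp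
        exact ih (i + 1) j (some s) (by omega) (fun s' h => by cases h; exact hs s rfl) p hp
      · simp only [pvRunsGo, if_neg hx] at hp
        rw [pvRunsGo_acc] at hp
        rcases List.mem_append.mp hp with h' | h'
        · simp only [List.nil_append, List.mem_singleton] at h'
          subst h'; exact hs s rfl
        · exact ih (i + 1) j none (by omega) (fun s' h => by cases h) p h'

lemma pvLeadSplit (v : Int) :
    ∀ (l : List Int), (∃ x ∈ l, x ≠ v) →
      ∃ (k : Nat) (w : Int) (t : List Int), l = List.replicate k v ++ w :: t ∧ w ≠ v := by
  intro l
  induction l with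
  | nil => rintro ⟨x, hx, -⟩; simp at hx
  | cons x xs ih =>
    rintro ⟨y, hy, hyv⟩
    by_cases hx : x = v
    · have hyxs : y ∈ xs := by
        rcases List.mem_cons.mp hy with rfl | h'
        · exact absurd hx hyv
        · exact h'
      obtain ⟨k, w, t, ht, hw⟩ := ih ⟨y, hyxs, hyv⟩
      exact ⟨k + 1, w, t, by rw [List.replicate_succ, List.cons_append, ht, hx], hw⟩
    · exact ⟨0, x, xs, by simp, hx⟩

lemma pvLead_lt {v : Int} {pre' rest' : List Int} {k : Nat} {w : Int} {t : List Int}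
    (h : pre' ++ rest' = List.replicate k v ++ w :: t) (hpre : pre' ≠ [])
    (hlast : pre'.getLast? ≠ some v) (hw : w ≠ v) : k < pre'.length := by
  by_contra h'
  push_neg at h'
  have htake : pre' = List.replicate pre'.length v := by
    have h1 := congrArg (List.take pre'.length) h
    rwa [List.take_left, List.take_append_of_le_length (by simpa using h'),
      List.take_replicate, Nat.min_eq_left h'] at h1
  apply hlast
  rw [htake]
  have hlen : pre'.length ≠ 0 := by
    intro h0; exact hpre (List.eq_nil_of_length_eq_zero h0)
  obtain ⟨m, hm⟩ : ∃ m, pre'.length = m + 1 := ⟨pre'.length - 1, by omega⟩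
  rw [hm]
  simp [List.getLast?_eq_head?_reverse, List.reverse_replicate, List.replicate_succ]
  cases m <;> simp [List.replicate_succ]

lemma pvP2_spec (v n w : Int) (hw : w ≠ v) :
    ∀ (k : Nat) (t : List Int) (pos run mid old : Int),
      pvP2 v n (List.replicate k v ++ w :: t) pos run mid old =
        if old < run + k then pvWrapmid n pos (run + (k : Int)) else mid := by
  intro k
  induction k with
  | zero => intro t pos run mid old; simp [pvP2, hw]
  | succ k ih =>
    intro t pos run mid old
    rw [List.replicate_succ, List.cons_append]
    simp only [pvP2, if_pos rfl]
    rw [ih]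
    have h1 : run + 1 + (k : Int) = run + ((k : Nat) + 1 : Int) := by push_cast; ring
    rw [h1]
    push_cast
    ring_nf

lemma pvLoopA_phase2 (arr : List Int) (v : Int) :
    ∀ (suf pre : List Int) (pos run mid old : Int) (fuel : Nat),
      arr = pre ++ suf → suf.length + 1 ≤ fuel → 1 ≤ run → (∃ x ∈ suf, x ≠ v) →
      pvLoopA arr v fuel ((pre.length : Int)) pos run mid old true =
        pvP2 v ((arr.length : Int)) suf pos run mid old := by
  intro suf
  induction suf with
  | nil => rintro pre pos run mid old fuel harr hfuel hrun ⟨x, hx, -⟩; simp at hx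
  | cons x xs ih =>
    intro pre pos run mid old fuel harr hfuel hrun hex
    obtain ⟨f, rfl⟩ : ∃ f, fuel = f + 1 := ⟨fuel - 1, by omega⟩
    subst harr
    by_cases hx : x = v
    · obtain ⟨y, hy, hyv⟩ : ∃ y ∈ xs, y ≠ v := by
        obtain ⟨y, hy, hyv⟩ := hex
        rcases List.mem_cons.mp hy with rfl | h'
        · exact absurd hx hyv
        · exact ⟨y, h', hyv⟩
      have hxsne : xs ≠ [] := by rintro rfl; simp at hy
      have hxslen : 1 ≤ xs.length := List.length_pos_iff.mpr hxsne
      simp only [pvLoopA, pvGetAt, if_pos hx]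
      conv_rhs => rw [show pvP2 v ((pre ++ x :: xs).length : Int) (x :: xs) pos run mid old
        = pvP2 v ((pre ++ x :: xs).length : Int) xs pos (run + 1) mid old from by
          simp [pvP2, hx]]
      rw [if_neg (by omega : ¬ run = 0)]
      have hlen : ((pre ++ x :: xs).length : Int) = (pre.length : Int) + 1 + xs.length := by
        push_cast [List.length_append, List.length_cons]; ring
      rw [if_neg (by rintro ⟨h1, -⟩; rw [hlen] at h1; omega),
          if_neg (by rintro ⟨h1, -⟩; rw [hlen] at h1; omega)]
      have heq := ih (pre ++ [x]) pos (run + 1) mid old f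
        (by simp) (by simp only [List.length_cons] at hfuel; omega) (by omega) ⟨y, hy, hyv⟩
      rw [List.append_cons pre x xs]
      simpa using heq
    · simp only [pvLoopA, pvGetAt, if_neg hx]
      simp [pvP2, hx, pvWrapmid]

lemma pvModWrap {n s l : Int} (hs : 0 ≤ s) (hl : 1 ≤ l)
    (hlt : s + PySem.Int.floordiv l 2 < 2 * n) :
    PySem.Int.mod (s + PySem.Int.floordiv l 2) n = pvWrapmid n s l := by
  rw [pvMod_small (by have := pvFd_nonneg (by omega : (0:Int) ≤ l); omega) hlt]
  simp [pvWrapmid]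

-- Ending with no open trailing run: the answer is A's folded mid over the closed runs.
lemma pvFinishNoWrap (arr : List Int) (v : Int) (acc : List (Int × Int))
    (hacc : ∀ p ∈ acc, 1 ≤ p.2 ∧ 0 ≤ p.1 ∧ p.1 + p.2 < (arr.length : Int))
    (hR : pvRunsGo v arr 0 none [] = acc) :
    (pvAmid (arr.length : Int) acc (0, 0)).1 = find_mid_of_longest_run_with_wrap_alt arr v := by
  unfold find_mid_of_longest_run_with_wrap_alt
  rw [hR]
  cases acc with
  | nil => simp [pvAmid]
  | cons a0 at' =>
    simp only []
    rw [if_neg (by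
      rintro ⟨-, -, hsum⟩
      have hlast := hacc _ (List.getLast_mem (List.cons_ne_nil a0 at'))
      omega)]
    simp only [List.tail_cons, List.headD_cons]
    obtain ⟨ha1, ha2, ha3⟩ := hacc a0 (by simp)
    rw [pvAmid_cons _ _ _ (by omega)]
    set b := pvSelect at' a0 with hb
    obtain ⟨hb1, hb2, hb3⟩ := hacc b (by have := pvSelect_mem at' a0; rw [← hb] at this; exact this)
    have hm0 : 0 ≤ b.1 + PySem.Int.floordiv b.2 2 := by have := pvFd_nonneg (by omega : (0:Int) ≤ b.2); omega
    have hmlt : b.1 + PySem.Int.floordiv b.2 2 < (arr.length : Int) := by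
      have := pvFd_lt (by omega : (1:Int) ≤ b.2); omega
    rw [pvMod_small hm0 (by omega), if_neg (by omega)]
    simp only [pvWrapmid]
    rw [if_neg (by omega)]

-- Ending with an open trailing run that wraps: A's second pass equals B's merged selection.
lemma pvFinishWrap (arr : List Int) (v : Int) (acc : List (Int × Int)) (pos run : Int)
    (k : Nat) (w : Int) (t : List Int)
    (harr : arr = List.replicate k v ++ w :: t) (hw : w ≠ v)
    (hrun : 1 ≤ run) (hpos : 1 ≤ pos) (hn : pos + run = (arr.length : Int))
    (hk : (k : Int) < pos)
    (hacc : ∀ p ∈ acc, 1 ≤ p.2 ∧ 0 ≤ p.1 ∧ p.1 + p.2 < pos)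
    (hR : pvRunsGo v arr 0 none [] = acc ++ [(pos, run)]) :
    (if (pvAmid (arr.length : Int) acc (0, 0)).2 < run + k then
        pvWrapmid (arr.length : Int) pos (run + (k : Int))
      else (pvAmid (arr.length : Int) acc (0, 0)).1)
      = find_mid_of_longest_run_with_wrap_alt arr v := by
  have hn1 : (1:Int) ≤ (arr.length : Int) := by omega
  by_cases hk0 : k = 0
  · -- no leading run of v: the trailing run does not merge
    subst hk0
    simp only [List.replicate_zero, List.nil_append] at harr
    have hRt : pvRunsGo v arr 0 none [] = pvRunsGo v t 1 none [] := by
      rw [harr]; simp [pvRunsGo, hw]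
    have hmono : ∀ p ∈ pvRunsGo v arr 0 none [], (1:Int) ≤ p.1 := by
      rw [hRt]; exact fun p hp => pvRunsGo_mono v t 1 1 none le_rfl (fun s h => by cases h) p hp
    unfold find_mid_of_longest_run_with_wrap_alt
    rw [hR]
    cases acc with
    | nil =>
      simp only [List.nil_append, pvAmid]
      rw [if_pos (show ((0:Int),(0:Int)).2 < run + ((0:Nat):Int) by simp; omega)]
      rw [if_neg (show ¬(([] : List (Int × Int)) ≠ [] ∧ (pos, run).1 = 0 ∧
          (((pos, run) :: ([] : List (Int × Int))).getLast (List.cons_ne_nil _ _)).1 +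
          (((pos, run) :: ([] : List (Int × Int))).getLast (List.cons_ne_nil _ _)).2 =
          (arr.length : Int)) by rintro ⟨hne, -⟩; exact hne rfl)]
      simp only [List.tail_cons, List.headD_cons, pvSelect, Nat.cast_zero, add_zero]
      rw [pvModWrap (by omega) (by omega)
        (by have := pvFd_lt (by omega : (1:Int) ≤ run); omega)]
    | cons a0 at' =>
      have ha01 : (1:Int) ≤ a0.1 := hmono a0 (by rw [hR]; simp)
      obtain ⟨ha1', -, -⟩ := hacc a0 (by simp)
      rw [pvAmid_cons _ _ _ (by omega)]
      set b := pvSelect at' a0 with hb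
      have hbmem : b ∈ a0 :: at' := pvSelect_mem at' a0
      obtain ⟨hb1, hb2, hb3⟩ := hacc b hbmem
      simp only [List.cons_append, Nat.cast_zero, add_zero]
      by_cases hbr : b.2 < run
      · rw [if_pos (show (pvWrapmid (arr.length : Int) b.1 b.2, b.2).2 < run from hbr)]
        rw [if_neg (by rintro ⟨-, h0, -⟩; omega)]
        simp only [List.tail_cons, List.headD_cons]
        rw [pvSelect_append, ← hb]
        simp only [pvSelect]
        rw [if_pos (show (pos, run).2 > b.2 from hbr)]
        dsimp only
        rw [pvModWrap (by omega) (by omega)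
          (by have := pvFd_lt (by omega : (1:Int) ≤ run); omega)]
      · rw [if_neg (show ¬(pvWrapmid (arr.length : Int) b.1 b.2, b.2).2 < run from hbr)]
        rw [if_neg (by rintro ⟨-, h0, -⟩; omega)]
        simp only [List.tail_cons, List.headD_cons]
        rw [pvSelect_append, ← hb]
        simp only [pvSelect]
        rw [if_neg (show ¬(pos, run).2 > b.2 from hbr)]
        rw [pvModWrap hb2 (by omega) (by have := pvFd_lt (by omega : (1:Int) ≤ b.2); omega)]
  · -- leading run of length k ≥ 1 merges into the trailing run
    have hk1 : 0 < k := by omega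
    have hRt : pvRunsGo v arr 0 none [] = (0, (k:Int)) :: pvRunsGo v t ((k:Int) + 1) none [] := by
      rw [harr, pvRunsGo_lead v w hw k hk1 t 0 [], pvRunsGo_acc]
      norm_num
    cases acc with
    | nil =>
      exfalso
      rw [hRt] at hR
      simp only [List.nil_append] at hR
      have h1 := congrArg (fun l => l.headD ((0:Int),(0:Int))) hR
      simp only [List.headD_cons] at h1
      have h2 := congrArg Prod.fst h1
      simp only at h2
      omega
    | cons a0 at' =>
      rw [hRt] at hR
      simp only [List.cons_append, List.cons.injEq] at hR
      obtain ⟨hhead, htail⟩ := hR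
      have ha01 : a0.1 = 0 := by rw [← hhead]
      have ha02 : a0.2 = (k:Int) := by rw [← hhead]
      unfold find_mid_of_longest_run_with_wrap_alt
      rw [hRt, hhead, htail]
      simp only []
      have hgl : (a0 :: (at' ++ [(pos, run)])).getLast (List.cons_ne_nil _ _) = (pos, run) := by
        have h1 : (a0 :: (at' ++ [(pos, run)])).getLast? = some (pos, run) := by
          rw [show a0 :: (at' ++ [(pos, run)]) = (a0 :: at') ++ [(pos, run)] from rfl,
            List.getLast?_concat]
        rw [List.getLast?_eq_some_getLast (List.cons_ne_nil _ _)] at h1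
        exact Option.some.inj h1
      rw [pvAmid_cons _ _ _ (by rw [ha02]; exact_mod_cast hk1)]
      set bacc := pvSelect at' a0 with hbacc
      have hbmem : bacc ∈ a0 :: at' := pvSelect_mem at' a0
      obtain ⟨hc1, hc2, hc3⟩ := hacc bacc hbmem
      have hfd2n : pos + PySem.Int.floordiv (run + (k:Int)) 2 < 2 * (arr.length : Int) := by
        have := pvFd_lt (by omega : (1:Int) ≤ run + (k:Int)); omega
      have hselle := pvSelect_le at' a0
      by_cases hcnd : bacc.2 < run + (k:Int)
      · rw [if_pos (show (pvWrapmid (arr.length : Int) bacc.1 bacc.2, bacc.2).2 < run + (k:Int) from hcnd)]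
        rw [if_pos (by
          refine ⟨by simp, ha01, ?_⟩
          rw [hgl]; omega)]
        rw [hgl, List.dropLast_concat]
        cases at' with
        | nil =>
          simp only [List.nil_append, List.tail_cons, List.headD_cons, pvSelect]
          rw [ha02, pvModWrap (by omega) (by omega) (by rw [← ha02] at hfd2n ⊢; exact hfd2n)]
        | cons b0 bt =>
          simp only [List.cons_append, List.tail_cons, List.headD_cons]
          rw [pvSelect_append]
          simp only [pvSelect]
          set bat := pvSelect bt b0 with hbat
          have hbatmem : bat ∈ b0 :: bt := pvSelect_mem bt b0
          have hbatle : bat.2 ≤ bacc.2 := hselle.2 bat hbatmem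
          rw [if_pos (show (pos, run + a0.2).2 > bat.2 by dsimp only; omega)]
          dsimp only
          rw [ha02, pvModWrap (by omega) (by omega) hfd2n]
      · rw [if_neg (show ¬(pvWrapmid (arr.length : Int) bacc.1 bacc.2, bacc.2).2 < run + (k:Int) from hcnd)]
        -- bacc has length ≥ run + k > k, so it lies in at' and ignores the head
        have hbk : (k:Int) < bacc.2 := by omega
        have hbin : bacc ∈ at' := by
          rcases List.mem_cons.mp hbmem with he | h'
          · rw [he] at hbk; omega
          · exact h'
        cases at' with
        | nil => simp at hbin
        | cons b0 bt =>
          rw [if_pos (by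
            refine ⟨by simp, ha01, ?_⟩
            rw [hgl]; omega)]
          rw [hgl, List.dropLast_concat]
          simp only [List.cons_append, List.tail_cons, List.headD_cons]
          rw [pvSelect_append]
          -- bacc = pvSelect (b0 :: bt) a0 = pvSelect bt b0
          have hswitch : bacc = pvSelect bt b0 := by
            rw [hbacc]
            simp only [pvSelect]
            by_cases hb0 : b0.2 > a0.2
            · rw [if_pos hb0]
            · rw [if_neg hb0]
              refine pvSelect_switch bt a0 b0 (by omega) ⟨bacc, ?_, by omega⟩
              rcases List.mem_cons.mp hbin with he | h'
              · exfalso; rw [he] at hbk; omega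
              · exact h'
          rw [← hswitch]
          simp only [pvSelect]
          rw [if_neg (show ¬(pos, run + a0.2).2 > bacc.2 by dsimp only; omega)]
          rw [pvModWrap hc2 (by omega) (by have := pvFd_lt (by omega : (1:Int) ≤ bacc.2); omega)]

lemma pvGrand (arr : List Int) (v : Int) :
    ∀ (suf pre : List Int) (pos run mid old : Int) (ost : Option Int)
      (acc : List (Int × Int)) (fuel : Nat),
      arr = pre ++ suf → suf ≠ [] → suf.length + arr.length + 2 ≤ fuel →
      0 ≤ run → 0 ≤ old → 0 ≤ pos →
      (run = 0 → ost = none ∧ (pre = [] ∨ pre.getLast? ≠ some v)) →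
      (0 < run → ost = some pos ∧ (pre.length : Int) = pos + run ∧
        ∃ pre', pre = pre' ++ List.replicate run.toNat v ∧ (pre'.length : Int) = pos ∧
          (pre' = [] ∨ pre'.getLast? ≠ some v)) →
      ((mid, old) = pvAmid (arr.length : Int) acc (0, 0)) →
      (∀ p ∈ acc, 1 ≤ p.2 ∧ 0 ≤ p.1 ∧ p.1 + p.2 < (if run = 0 then (pre.length : Int) else pos)) →
      pvRunsGo v suf (pre.length : Int) ost acc = pvRunsGo v arr 0 none [] →
      pvLoopA arr v fuel (pre.length : Int) pos run mid old false =
        find_mid_of_longest_run_with_wrap_alt arr v := by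
  intro suf
  induction suf with
  | nil => intro pre pos run mid old ost acc fuel _ hne; exact absurd rfl hne
  | cons x xs ih =>
    intro pre pos run mid old ost acc fuel harr hne hfuel hrun0 hold0 hpos0 h0 hposr hamid haccb hReq
    obtain ⟨f, rfl⟩ : ∃ f, fuel = f + 1 := ⟨fuel - 1, by omega⟩
    subst harr
    have hn : ((pre ++ x :: xs).length : Int) = (pre.length : Int) + 1 + (xs.length : Int) := by
      push_cast [List.length_append, List.length_cons]; ring
    by_cases hx : x = v
    · -- ---- value branch ----
      simp only [pvLoopA, pvGetAt, if_pos hx]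
      have hcur : run = 0 ∨ ((pre.length : Int) = pos + run ∧ 0 < run) := by
        rcases eq_or_lt_of_le hrun0 with h | h
        · exact Or.inl h.symm
        · exact Or.inr ⟨(hposr h).2.1, h⟩
      -- the new open-run start
      have hexists : ∃ pos2 : Int, (if run = 0 then ((pre.length : Int)) else pos) = pos2 := ⟨_, rfl⟩
      obtain ⟨pos2, hpos2⟩ := hexists
      rw [hpos2]
      have hcur2 : (pre.length : Int) = pos2 + run := by
        rcases hcur with h | ⟨h, hlt⟩
        · rw [← hpos2, if_pos h]; omega
        · rw [← hpos2, if_neg (by omega)]; exact h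
      have hpos20 : 0 ≤ pos2 := by
        rcases eq_or_lt_of_le hrun0 with h | h
        · rw [← hpos2, if_pos h.symm]; positivity
        · rw [← hpos2, if_neg (by omega)]; exact hpos0
      have hdecomp : ∃ pre', pre ++ [x] = pre' ++ List.replicate (run + 1).toNat v ∧
          ((pre'.length : Int)) = pos2 ∧ (pre' = [] ∨ pre'.getLast? ≠ some v) := by
        rcases eq_or_lt_of_le hrun0 with h | h
        · refine ⟨pre, ?_, by rw [← hpos2, if_pos h.symm], (h0 h.symm).2⟩
          rw [show (run + 1).toNat = 1 from by omega]
          simp [hx]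
        · obtain ⟨-, -, pre', hp1, hp2, hp3⟩ := hposr h
          refine ⟨pre', ?_, by rw [← hpos2, if_neg (by omega)]; exact hp2, hp3⟩
          rw [hp1, show (run + 1).toNat = run.toNat + 1 from by omega, List.replicate_succ',
            ← List.append_assoc, hx]
      have hostnew : pvRunsGo v (x :: xs) ((pre.length : Int)) ost acc
          = pvRunsGo v xs ((pre.length : Int) + 1) (some pos2) acc := by
        rcases eq_or_lt_of_le hrun0 with h | h
        · rw [(h0 h.symm).1]; simp only [pvRunsGo, if_pos hx]
          rw [← hpos2, if_pos h.symm]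
        · rw [(hposr h).1]; simp only [pvRunsGo, if_pos hx]
          rw [← hpos2, if_neg (by omega)]
      have haccb2 : ∀ p ∈ acc, 1 ≤ p.2 ∧ 0 ≤ p.1 ∧ p.1 + p.2 < pos2 := by
        intro p hp; have hb := haccb p hp
        rcases eq_or_lt_of_le hrun0 with h | h
        · rw [if_pos h.symm] at hb; rw [← hpos2, if_pos h.symm]; exact hb
        · rw [if_neg (by omega)] at hb; rw [← hpos2, if_neg (by omega)]; exact hb
      cases xs with
      | cons x2 xs2 =>
        have hlt : (pre.length : Int) + 1 < ((pre ++ x :: x2 :: xs2).length : Int) := by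
          rw [hn]; simp only [List.length_cons]; push_cast; omega
        rw [if_neg (by rintro ⟨h1, -⟩; omega), if_neg (by rintro ⟨h1, -⟩; omega)]
        rw [show ((pre.length : Int) + 1) = (((pre ++ [x]).length : Int)) from by
          push_cast [List.length_append, List.length_cons, List.length_nil]; omega]
        refine ih (pre ++ [x]) pos2 (run + 1) mid old (some pos2) acc f
          (by simp) (by simp) (by simp only [List.length_cons] at hfuel ⊢; omega)
          (by omega) hold0 hpos20
          (fun h => absurd h (by omega))
          (fun _ => ⟨rfl, by push_cast [List.length_append, List.length_cons, List.length_nil]; omega, hdecomp⟩)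
          hamid
          (fun p hp => by rw [if_neg (by omega)]; exact haccb2 p hp)
          ?_
        rw [show (((pre ++ [x]).length : Int)) = ((pre.length : Int) + 1) from by
          push_cast [List.length_append, List.length_cons, List.length_nil]; omega]
        rw [← hostnew]
        exact hReq
      | nil =>
        have hne2 : (pre.length : Int) + 1 = ((pre ++ [x]).length : Int) := by
          push_cast [List.length_append, List.length_cons, List.length_nil]; omega
        by_cases hrn : run + 1 = ((pre ++ [x]).length : Int)
        · rw [if_pos ⟨hne2, Or.inr hrn⟩, if_pos hrn]
          have hp20 : pos2 = 0 := by omega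
          have haccnil : acc = [] := by
            cases acc with
            | nil => rfl
            | cons p ps =>
              exfalso; have := haccb2 p (by simp); omega
          have hRfinal : pvRunsGo v (pre ++ [x]) 0 none []
              = [((0 : Int), ((pre ++ [x]).length : Int))] := by
            rw [← hReq, hostnew, haccnil]
            simp only [pvRunsGo, List.nil_append]
            rw [hp20]
            rw [show (pre.length : Int) + 1 - 0 = ((pre ++ [x]).length : Int) from by omega]
          unfold find_mid_of_longest_run_with_wrap_alt
          rw [hRfinal]
          simp only []
          rw [if_neg (by rintro ⟨hc, -⟩; exact hc rfl)]
          simp only [List.tail_cons, List.headD_cons, pvSelect]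
          have hn1 : (1 : Int) ≤ ((pre ++ [x]).length : Int) := by
            simp [List.length_append]
          have hmodv : PySem.Int.mod ((0 : Int) + PySem.Int.floordiv ((pre ++ [x]).length : Int) 2)
              ((pre ++ [x]).length : Int) = PySem.Int.floordiv ((pre ++ [x]).length : Int) 2 := by
            rw [zero_add, pvMod_small (pvFd_nonneg (by omega)) (by
              have := pvFd_lt (l := ((pre ++ [x]).length : Int)) (by omega); omega)]
            rw [if_neg (by have := pvFd_lt (l := ((pre ++ [x]).length : Int)) (by omega); omega)]
          exact hmodv.symm
        · rw [if_neg (by rintro ⟨-, h2 | h2⟩ <;> omega),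
            if_pos ⟨hne2, by omega⟩]
          have hrunlt : run + 1 < ((pre ++ [x]).length : Int) := by
            have : (pre.length : Int) = pos2 + run := hcur2
            omega
          have hpos21 : 1 ≤ pos2 := by omega
          obtain ⟨pre', hp1, hp2, hp3⟩ := hdecomp
          have hpre'ne : pre' ≠ [] := by
            intro h; rw [h] at hp2; simp at hp2; omega
          have hlastv : pre'.getLast? ≠ some v := by
            rcases hp3 with h | h
            · exact absurd h hpre'ne
            · exact h
          have hex : ∃ y ∈ pre ++ [x], y ≠ v := by
            refine ⟨pre'.getLast hpre'ne, ?_, ?_⟩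
            · rw [hp1]; exact List.mem_append_left _ (List.getLast_mem hpre'ne)
            · intro hv; apply hlastv
              rw [List.getLast?_eq_some_getLast hpre'ne, hv]
          have hph := pvLoopA_phase2 (pre ++ [x]) v (pre ++ [x]) [] pos2 (run + 1) mid old f
            (by simp) (by simp only [List.length_cons] at hfuel; simp [List.length_append]; omega)
            (by omega) hex
          simp only [List.length_nil, Nat.cast_zero] at hph
          rw [hph]
          obtain ⟨k, w, t, hsplit, hw⟩ := pvLeadSplit v (pre ++ [x]) hex
          rw [show pvP2 v (((pre ++ [x]).length : Int)) (pre ++ [x]) pos2 (run + 1) mid old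
              = pvP2 v (((pre ++ [x]).length : Int)) (List.replicate k v ++ w :: t) pos2 (run + 1) mid old from by
            rw [← hsplit]]
          rw [pvP2_spec v _ w hw k t]
          have hk : (k : Int) < pos2 := by
            have hkl := pvLead_lt (v := v) (pre' := pre')
              (rest' := List.replicate (run + 1).toNat v) (by rw [← hp1, hsplit]) hpre'ne hlastv hw
            have : ((k : Int)) < (pre'.length : Int) := by exact_mod_cast hkl
            omega
          have hRfinal : pvRunsGo v (pre ++ [x]) 0 none [] = acc ++ [(pos2, run + 1)] := by
            rw [← hReq, hostnew]
            simp only [pvRunsGo]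
            rw [show (pre.length : Int) + 1 - pos2 = run + 1 from by omega]
          have hfin := pvFinishWrap (pre ++ [x]) v acc pos2 (run + 1) k w t hsplit hw
            (by omega) hpos21 (by omega) hk haccb2 hRfinal
          have hmid : mid = (pvAmid (((pre ++ [x]).length : Int)) acc (0, 0)).1 :=
            congrArg Prod.fst hamid
          have hold : old = (pvAmid (((pre ++ [x]).length : Int)) acc (0, 0)).2 :=
            congrArg Prod.snd hamid
          rw [hmid, hold]
          rw [show run + 1 + (k : Int) = run + 1 + (k : Int) from rfl]
          exact hfin
    · -- ---- non-value branch ----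
      simp only [pvLoopA, pvGetAt, if_neg hx]
      simp only [show ((false = true)) = False from by simp, if_false]
      rcases eq_or_lt_of_le hrun0 with hr0 | hr0
      · -- run = 0: nothing closes, state unchanged
        rw [if_neg (show ¬ old < run by omega), if_neg (show ¬ old < run by omega),
          if_neg (show ¬ old < run by omega)]
        have hReq2 : pvRunsGo v xs ((pre.length : Int) + 1) none acc
            = pvRunsGo v (pre ++ x :: xs) 0 none [] := by
          rw [← hReq, (h0 hr0.symm).1]
          simp only [pvRunsGo, if_neg hx]
        cases xs with
        | cons x2 xs2 =>
          have hlt : (pre.length : Int) + 1 < ((pre ++ x :: x2 :: xs2).length : Int) := by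
            rw [hn]; simp only [List.length_cons]; push_cast; omega
          rw [if_neg (by rintro ⟨h1, -⟩; omega), if_neg (by rintro ⟨-, h1⟩; exact h1 rfl)]
          rw [show ((pre.length : Int) + 1) = (((pre ++ [x]).length : Int)) from by
            push_cast [List.length_append, List.length_cons, List.length_nil]; omega]
          refine ih (pre ++ [x]) pos 0 mid old none acc f
            (by simp) (by simp) (by simp only [List.length_cons] at hfuel ⊢; omega)
            le_rfl hold0 hpos0
            (fun _ => ⟨rfl, Or.inr (by
              rw [show pre ++ [x] = pre ++ [x] from rfl, List.getLast?_concat]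
              intro hc; exact hx (Option.some.inj hc))⟩)
            (fun h => absurd h (by omega))
            hamid
            (fun p hp => by
              have hb := haccb p hp
              rw [if_pos hr0.symm] at hb
              rw [if_pos rfl]
              push_cast [List.length_append, List.length_cons, List.length_nil]
              omega)
            ?_
          rw [show (((pre ++ [x]).length : Int)) = ((pre.length : Int) + 1) from by
            push_cast [List.length_append, List.length_cons, List.length_nil]; omega]
          exact hReq2
        | nil =>
          have hne2 : (pre.length : Int) + 1 = ((pre ++ [x]).length : Int) := by
            push_cast [List.length_append, List.length_cons, List.length_nil]; omega
          rw [if_pos (show ((pre.length : Int) + 1 = ((pre ++ [x]).length : Int) ∧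
              (True ∨ (0 : Int) = ((pre ++ [x]).length : Int))) from ⟨hne2, Or.inl trivial⟩)]
          rw [if_neg (show ¬ (0 : Int) = ((pre ++ [x]).length : Int) by
            simp [List.length_append]; omega)]
          have hR2 : pvRunsGo v (pre ++ [x]) 0 none [] = acc := by
            rw [← hReq2]; simp [pvRunsGo]
          have hm := congrArg Prod.fst hamid
          dsimp only at hm
          rw [hm]
          exact pvFinishNoWrap (pre ++ [x]) v acc
            (fun p hp => by
              have hb := haccb p hp
              rw [if_pos hr0.symm] at hb
              push_cast [List.length_append, List.length_cons, List.length_nil]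
              omega) hR2
      · -- run > 0: the open run (pos, run) closes
        obtain ⟨host, hlen, -⟩ := hposr hr0
        have hamid2 :
            ((if old < run then pvWrapmid (((pre ++ x :: xs).length : Int)) pos run else mid),
             (if old < run then run else old))
            = pvAmid (((pre ++ x :: xs).length : Int)) (acc ++ [(pos, run)]) (0, 0) := by
          rw [pvAmid_append, ← hamid]
          by_cases hor : old < run
          · rw [if_pos hor, if_pos hor, if_pos hor]
          · rw [if_neg hor, if_neg hor, if_neg hor]
        have haccb3 : ∀ p ∈ acc ++ [(pos, run)],
            1 ≤ p.2 ∧ 0 ≤ p.1 ∧ p.1 + p.2 < ((pre ++ [x]).length : Int) := by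
          intro p hp
          rcases List.mem_append.mp hp with hp' | hp'
          · have hb := haccb p hp'
            rw [if_neg (by omega)] at hb
            push_cast [List.length_append, List.length_cons, List.length_nil]
            omega
          · simp only [List.mem_singleton] at hp'
            subst hp'
            refine ⟨by omega, by omega, ?_⟩
            push_cast [List.length_append, List.length_cons, List.length_nil]
            omega
        have hReq2 : pvRunsGo v xs ((pre.length : Int) + 1) none (acc ++ [(pos, run)])
            = pvRunsGo v (pre ++ x :: xs) 0 none [] := by
          rw [← hReq, host]
          simp only [pvRunsGo, if_neg hx]
          rw [show (pre.length : Int) - pos = run from by omega]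
        cases xs with
        | cons x2 xs2 =>
          have hlt : (pre.length : Int) + 1 < ((pre ++ x :: x2 :: xs2).length : Int) := by
            rw [hn]; simp only [List.length_cons]; push_cast; omega
          rw [if_neg (by rintro ⟨h1, -⟩; omega), if_neg (by rintro ⟨-, h1⟩; exact h1 rfl)]
          rw [show ((pre.length : Int) + 1) = (((pre ++ [x]).length : Int)) from by
            push_cast [List.length_append, List.length_cons, List.length_nil]; omega]
          refine ih (pre ++ [x]) (if old < run then ((pre.length : Int)) else pos) 0
            (if old < run then pvWrapmid (((pre ++ x :: x2 :: xs2).length : Int)) pos run else mid)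
            (if old < run then run else old) none (acc ++ [(pos, run)]) f
            (by simp) (by simp) (by simp only [List.length_cons] at hfuel ⊢; omega)
            le_rfl (by split_ifs <;> omega) (by split_ifs <;> [positivity; exact hpos0])
            (fun _ => ⟨rfl, Or.inr (by
              rw [List.getLast?_concat]
              intro hc; exact hx (Option.some.inj hc))⟩)
            (fun h => absurd h (by omega))
            hamid2
            (fun p hp => by rw [if_pos rfl]; exact haccb3 p hp)
            ?_
          rw [show (((pre ++ [x]).length : Int)) = ((pre.length : Int) + 1) from by
            push_cast [List.length_append, List.length_cons, List.length_nil]; omega]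
          exact hReq2
        | nil =>
          have hne2 : (pre.length : Int) + 1 = ((pre ++ [x]).length : Int) := by
            push_cast [List.length_append, List.length_cons, List.length_nil]; omega
          rw [if_pos (show ((pre.length : Int) + 1 = ((pre ++ [x]).length : Int) ∧
              (True ∨ (0 : Int) = ((pre ++ [x]).length : Int))) from ⟨hne2, Or.inl trivial⟩)]
          rw [if_neg (show ¬ (0 : Int) = ((pre ++ [x]).length : Int) by
            simp [List.length_append]; omega)]
          have hR2 : pvRunsGo v (pre ++ [x]) 0 none [] = acc ++ [(pos, run)] := by
            rw [← hReq2]; simp [pvRunsGo]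
          have hinl : (if pos + PySem.Int.floordiv run 2 ≥ ((pre ++ [x]).length : Int) then
              pos + PySem.Int.floordiv run 2 - ((pre ++ [x]).length : Int)
            else pos + PySem.Int.floordiv run 2)
              = pvWrapmid ((pre ++ [x]).length : Int) pos run := rfl
          rw [hinl]
          have hm := congrArg Prod.fst hamid2
          dsimp only at hm
          rw [hm]
          exact pvFinishNoWrap (pre ++ [x]) v (acc ++ [(pos, run)]) haccb3 hR2

-- ===== VERDICT (by name: the statement is the Claim_ definition above) =====
theorem find_mid_of_longest_run_with_wrap_spec : Claim_equal_find_mid_of_longest_run_with_wrap := by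
  intro arr value _ hpre
  unfold Spec_find_mid_of_longest_run_with_wrap
  obtain ⟨x, xs, rfl⟩ : ∃ x xs, arr = x :: xs := by
    cases arr with
    | nil => exact absurd rfl hpre
    | cons x xs => exact ⟨x, xs, rfl⟩
  show pvLoopA (x :: xs) value (2 * (x :: xs).length + 2) ((([] : List Int).length : Int)) 0 0 0 0 false = _
  exact pvGrand (x :: xs) value (x :: xs) [] 0 0 0 0 none [] _
    rfl (List.cons_ne_nil x xs) (by simp; omega) le_rfl le_rfl le_rfl
    (fun _ => ⟨rfl, Or.inl rfl⟩) (fun h => absurd h (by omega))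
    rfl (by simp) rfl
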